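-- pv_equiv track=rewrite | github.com/Jerrytd579/CS115 | CS115b/merge.py | drop_matches
-- ===== SOURCE A (Python) =====
-- def drop_matches(list1, list2):
--     """ Returns a new list that contains only the elements in list2 that are not in list1"""
--     list1.sort()
--     list2.sort()
--     i = j = 0
--     result = []
--     while i < len(list1) and j < len(list2):
--         if list1[i] == list2[j]:
--             i += 1
--             j += 1
--         elif list1[i] < list2[j]:
--             i += 1
--         else:
--             result.append(list2[j])
--             j += 1
--     while j < len(list2):
--         result.append(list2[j])
--         j += 1
--     return result
-- ===== SOURCE B (Python) =====
-- def drop_matches(list1, list2):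
--     """ Returns a new list that contains only the elements in list2 that are not in list1"""
--     list1.sort()
--     list2.sort()
--     counts = {}
--     for x in list1:
--         counts[x] = counts.get(x, 0) + 1
--     result = []
--     for x in list2:
--         if counts.get(x, 0) > 0:
--             counts[x] = counts.get(x, 0) - 1
--         else:
--             result.append(x)
--     return result
-- ===== Notes on version B (the rewrite author's own statement) =====
-- stated objective: alternative
-- what changed: Replaces the two-pointer merge walk over both sorted lists by a count dictionary built from list1 and a single pass over sorted list2 that decrements counts or keeps elements.
import Mathlib
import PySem

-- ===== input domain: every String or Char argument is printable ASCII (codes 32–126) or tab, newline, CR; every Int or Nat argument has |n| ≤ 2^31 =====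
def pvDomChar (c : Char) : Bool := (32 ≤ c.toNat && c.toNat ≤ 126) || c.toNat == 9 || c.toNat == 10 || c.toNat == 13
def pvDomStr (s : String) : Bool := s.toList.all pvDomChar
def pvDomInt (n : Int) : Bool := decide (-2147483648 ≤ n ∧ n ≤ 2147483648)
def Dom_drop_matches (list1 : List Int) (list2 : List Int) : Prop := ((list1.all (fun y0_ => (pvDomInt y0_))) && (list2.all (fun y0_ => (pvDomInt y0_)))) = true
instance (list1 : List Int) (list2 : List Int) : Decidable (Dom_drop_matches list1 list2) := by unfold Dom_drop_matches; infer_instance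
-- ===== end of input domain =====

-- B replaces A's two-pointer merge walk by a count dictionary from list1 and one pass
-- over sorted list2 (same cost, different algorithm). Both A and B sort both argument
-- lists in place; the equivalence proved here is about the return value.

-- ===== PORT A =====
-- first while loop of A: returns (result, j) at loop exit
def dmLoop1 (l1 l2 : List Int) (i j : Nat) (result : List Int) : List Int × Nat :=
  if _h : i < l1.length ∧ j < l2.length then
    if l1.getD i 0 = l2.getD j 0 then dmLoop1 l1 l2 (i + 1) (j + 1) result
    else if l1.getD i 0 < l2.getD j 0 then dmLoop1 l1 l2 (i + 1) j result
    else dmLoop1 l1 l2 i (j + 1) (result ++ [l2.getD j 0])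
  else (result, j)
termination_by (l1.length - i) + (l2.length - j)

-- second while loop of A
def dmLoop2 (l2 : List Int) (j : Nat) (result : List Int) : List Int :=
  if j < l2.length then dmLoop2 l2 (j + 1) (result ++ [l2.getD j 0])
  else result
termination_by l2.length - j

def drop_matches (list1 : List Int) (list2 : List Int) : List Int :=
  let s1 := PySem.List.sorted list1 (fun x => x) false
  let s2 := PySem.List.sorted list2 (fun x => x) false
  let p := dmLoop1 s1 s2 0 0 []
  dmLoop2 s2 p.2 p.1

-- ===== PORT B =====
-- loop body of B's pass over list2: decrement a positive count or keep the element
def bStep (st : PySem.Dict Int Int × List Int) (x : Int) : PySem.Dict Int Int × List Int :=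
  if st.1.getD x 0 > 0 then (st.1.insert x (st.1.getD x 0 - 1), st.2)
  else (st.1, st.2 ++ [x])

def drop_matches_alt (list1 : List Int) (list2 : List Int) : List Int :=
  let s1 := PySem.List.sorted list1 (fun x => x) false
  let s2 := PySem.List.sorted list2 (fun x => x) false
  let counts := s1.foldl (fun d x => d.insert x (d.getD x 0 + 1)) PySem.Dict.empty
  let st := s2.foldl bStep (counts, [])
  st.2

-- ===== PRECONDITION & SPEC =====
def Spec_drop_matches (list1 : List Int) (list2 : List Int) (out : List Int) : Prop := out = drop_matches_alt list1 list2
instance (list1 : List Int) (list2 : List Int) (out : List Int) : Decidable (Spec_drop_matches list1 list2 out) := by unfold Spec_drop_matches; infer_instance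

-- ===== CLAIM (what is proved, stated in full; the proofs are below) =====
def Claim_equal_drop_matches : Prop := ∀ (list1 : List Int) (list2 : List Int), Dom_drop_matches list1 list2 → Spec_drop_matches list1 list2 (drop_matches list1 list2)

-- ===== LEMMAS AND PROOFS =====

-- common abstraction: multiset difference of two sorted lists, merge style
def md : List Int → List Int → List Int
  | _, [] => []
  | [], b :: l2 => b :: l2
  | a :: l1, b :: l2 =>
    if a = b then md l1 l2
    else if a < b then md l1 (b :: l2)
    else b :: md (a :: l1) l2

-- common abstraction: one pass over l2 with a count function
def sLoop (c : Int → Int) : List Int → List Int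
  | [] => []
  | b :: l2 =>
    if 0 < c b then sLoop (fun x => if x = b then c b - 1 else c x) l2
    else b :: sLoop c l2

theorem md_nil_right (l1 : List Int) : md l1 [] = [] := by
  cases l1 <;> simp [md]

theorem md_nil_left (l2 : List Int) : md [] l2 = l2 := by
  cases l2 <;> simp [md]

theorem md_cons_cons (a : Int) (l1 : List Int) (b : Int) (l2 : List Int) :
    md (a :: l1) (b :: l2)
      = if a = b then md l1 l2
        else if a < b then md l1 (b :: l2)
        else b :: md (a :: l1) l2 := by
  simp [md]

theorem dmLoop2_eq (l2 : List Int) (j : Nat) (res : List Int) :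
    dmLoop2 l2 j res = res ++ l2.drop j := by
  induction j, res using dmLoop2.induct (l2 := l2) with
  | case1 j res h ih =>
    rw [dmLoop2, if_pos h, ih, List.drop_eq_getElem_cons h]
    simp [List.getElem?_eq_getElem h]
  | case2 j res h =>
    rw [dmLoop2, if_neg h, List.drop_of_length_le (by omega)]
    simp

theorem dmLoop1_eq (l1 l2 : List Int) (i j : Nat) (res : List Int) :
    dmLoop2 l2 (dmLoop1 l1 l2 i j res).2 (dmLoop1 l1 l2 i j res).1
      = res ++ md (l1.drop i) (l2.drop j) := by
  induction i, j, res using dmLoop1.induct (l1 := l1) (l2 := l2) with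
  | case1 i j res h heq ih =>
    rw [dmLoop1, dif_pos h, if_pos heq, ih,
      List.drop_eq_getElem_cons h.1, List.drop_eq_getElem_cons h.2, md_cons_cons]
    rw [List.getD_eq_getElem _ _ h.1, List.getD_eq_getElem _ _ h.2] at heq
    rw [if_pos heq]
  | case2 i j res h heq hlt ih =>
    rw [dmLoop1, dif_pos h, if_neg heq, if_pos hlt, ih,
      List.drop_eq_getElem_cons h.1, List.drop_eq_getElem_cons h.2, md_cons_cons]
    rw [List.getD_eq_getElem _ _ h.1, List.getD_eq_getElem _ _ h.2] at heq hlt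
    rw [if_neg heq, if_pos hlt, ← List.drop_eq_getElem_cons h.2]
  | case3 i j res h heq hlt ih =>
    rw [dmLoop1, dif_pos h, if_neg heq, if_neg hlt, ih,
      List.drop_eq_getElem_cons h.1, List.drop_eq_getElem_cons h.2, md_cons_cons]
    rw [List.getD_eq_getElem _ _ h.1, List.getD_eq_getElem _ _ h.2] at heq hlt
    rw [if_neg heq, if_neg hlt, ← List.drop_eq_getElem_cons h.1]
    simp [List.getElem?_eq_getElem h.2]
  | case4 i j res h =>
    rw [dmLoop1, dif_neg h, dmLoop2_eq]
    rcases Nat.lt_or_ge i l1.length with hi | hi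
    · have hj : l2.length ≤ j := by omega
      rw [List.drop_of_length_le hj]
      cases l1.drop i <;> simp [md_nil_right]
    · rw [List.drop_of_length_le hi]
      simp [md_nil_left]

theorem sLoop_congr (c c' : Int → Int) (l2 : List Int)
    (h : ∀ x ∈ l2, c x = c' x) : sLoop c l2 = sLoop c' l2 := by
  induction l2 generalizing c c' with
  | nil => rfl
  | cons b t ih =>
    have hb : c b = c' b := h b (by simp)
    rw [sLoop, sLoop, hb]
    split_ifs with hpos
    · exact ih _ _ (fun x hx => by by_cases hxb : x = b <;> simp [hxb, h x (by simp [hx])])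
    · rw [ih _ _ (fun x hx => h x (by simp [hx]))]

theorem sLoop_zero (c : Int → Int) (l2 : List Int)
    (h : ∀ x ∈ l2, c x ≤ 0) : sLoop c l2 = l2 := by
  induction l2 generalizing c with
  | nil => rfl
  | cons b t ih =>
    rw [sLoop, if_neg (by have := h b (by simp); omega)]
    rw [ih _ (fun x hx => h x (by simp [hx]))]

theorem md_eq_sLoop (l1 l2 : List Int) :
    l1.Pairwise (· ≤ ·) → l2.Pairwise (· ≤ ·) →
    md l1 l2 = sLoop (fun x => (l1.count x : Int)) l2 := by
  induction l1, l2 using md.induct with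
  | case1 x =>
    intro _ _
    simp [md_nil_right, sLoop]
  | case2 b l2 =>
    intro _ _
    rw [sLoop_zero _ _ (by intro x _; simp)]
    exact md_nil_left _
  | case3 l1 b l2 ih =>
    intro h1 h2
    have hpos : (0 : Int) < (((b :: l1).count b : Nat) : Int) := by
      exact_mod_cast List.count_pos_iff.mpr (List.mem_cons_self ..)
    rw [md_cons_cons, if_pos rfl, sLoop, if_pos hpos]
    rw [ih (List.Pairwise.of_cons h1) (List.Pairwise.of_cons h2)]
    apply sLoop_congr
    intro x _
    by_cases hxb : x = b
    · subst hxb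
      simp only [List.count_cons_self]
      push_cast
      ring
    · rw [if_neg hxb]
      simp [Ne.symm hxb]
  | case4 a l1 b l2 heq hlt ih =>
    intro h1 h2
    rw [md_cons_cons, if_neg heq, if_pos hlt]
    rw [ih (List.Pairwise.of_cons h1) h2]
    apply sLoop_congr
    intro x hx
    have hbx : b ≤ x := by
      rcases List.mem_cons.mp hx with h | h
      · omega
      · exact ((List.pairwise_cons.mp h2).1 x h)
    simp [show ¬a = x by omega]
  | case5 a l1 b l2 heq hlt ih =>
    intro h1 h2
    rw [md_cons_cons, if_neg heq, if_neg hlt]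
    have hba : b < a := by omega
    have hcb : (a :: l1).count b = 0 := by
      rw [List.count_eq_zero]
      intro hmem
      rcases List.mem_cons.mp hmem with h | h
      · omega
      · have := (List.pairwise_cons.mp h1).1 b h; omega
    rw [sLoop, if_neg (by rw [hcb]; simp)]
    rw [ih h1 (List.Pairwise.of_cons h2)]

theorem bFold_eq (l2 : List Int) (d : PySem.Dict Int Int) (res : List Int) :
    (l2.foldl bStep (d, res)).2 = res ++ sLoop (fun x => d.getD x 0) l2 := by
  induction l2 generalizing d res with
  | nil => simp [sLoop]
  | cons b t ih =>
    rw [List.foldl_cons]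
    simp only [sLoop]
    by_cases hpos : d.getD b 0 > 0
    · rw [show bStep (d, res) b = (d.insert b (d.getD b 0 - 1), res) from by
        simp [bStep, hpos]]
      rw [ih, if_pos hpos]
      congr 1
      apply sLoop_congr
      intro x _
      rw [PySem.Dict.getD_insert]
    · rw [show bStep (d, res) b = (d, res ++ [b]) from by simp [bStep, hpos]]
      rw [ih, if_neg hpos]
      simp

-- ===== VERDICT (by name: the statement is the Claim_ definition above) =====
theorem drop_matches_spec : Claim_equal_drop_matches := by
  intro list1 list2 _
  unfold Spec_drop_matches drop_matches drop_matches_alt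
  simp only
  rw [dmLoop1_eq, bFold_eq, List.drop_zero, List.drop_zero, List.nil_append, List.nil_append]
  rw [PySem.Dict.foldl_insert_getD_add_one_eq_counter]
  rw [md_eq_sLoop _ _ (PySem.List.sorted_pairwise _ _) (PySem.List.sorted_pairwise _ _)]
  apply sLoop_congr
  intro x _
  rw [PySem.Dict.getD_counter]
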